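-- pv_equiv track=rewrite | github.com/portkeyss/cb2 | 2178-maximum-split-of-positive-even-integers/2178-maximum-split-of-positive-even-integers.py | maximumEvenSplit
-- ===== SOURCE A (Python) =====
-- from typing import List
--
-- def maximumEvenSplit(finalSum: int) -> List[int]:
--     if finalSum%2==1: return []
--     i = 2
--     sm = 0
--     res = []
--     while sm<finalSum:
--         sm += i
--         res.append(i)
--         i += 2
--     if sm==finalSum: return res
--     x = res.pop()
--     res[-1] += finalSum-(sm-x)
--     return res
-- ===== SOURCE B (Python) =====
-- def maximumEvenSplit(finalSum: int):
--     if finalSum % 2 == 1 or finalSum <= 0: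
--         return []
--     # largest k with k*(k+1) <= finalSum, found by binary search on [0, finalSum]
--     lo, hi = 0, finalSum
--     while lo < hi:
--         mid = (lo + hi + 1) // 2
--         if mid * (mid + 1) <= finalSum:
--             lo = mid
--         else:
--             hi = mid - 1
--     k = lo
--     res = [2 * j for j in range(1, k + 1)]
--     rem = finalSum - k * (k + 1)
--     if rem:
--         res[-1] += rem
--     return res
-- ===== Notes on version B (the rewrite author's own statement) =====
-- stated objective: alternative
-- what changed: Replaces A's accumulate-until-overshoot loop over successive even integers with a binary search for the largest k with k*(k+1) <= finalSum, then builds the k even integers directly and folds the remainder into the last element.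
import Mathlib
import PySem

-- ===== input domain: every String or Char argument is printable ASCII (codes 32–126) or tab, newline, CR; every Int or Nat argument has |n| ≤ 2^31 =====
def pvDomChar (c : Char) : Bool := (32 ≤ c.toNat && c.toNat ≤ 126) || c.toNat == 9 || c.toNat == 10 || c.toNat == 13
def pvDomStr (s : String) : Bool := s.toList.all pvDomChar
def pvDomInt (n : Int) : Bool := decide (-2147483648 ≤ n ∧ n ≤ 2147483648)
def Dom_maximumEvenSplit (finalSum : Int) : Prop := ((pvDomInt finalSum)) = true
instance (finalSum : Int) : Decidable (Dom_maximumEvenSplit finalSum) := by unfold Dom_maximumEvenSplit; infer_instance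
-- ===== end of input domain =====

-- B replaces A's accumulate-until-overshoot loop with a binary search for the cutoff k
-- (alternative decomposition, similar cost); equivalence is about the return value.

-- ===== PORT A =====
-- 'while sm < finalSum: sm += i; res.append(i); i += 2'; the fuel only makes the loop
-- total (finalSum.toNat + 1 iterations are never exhausted, the guard always stops first)
def pvALoop (fuel : Nat) (finalSum i sm : Int) (res : List Int) : Int × List Int :=
  match fuel with
  | 0 => (sm, res)
  | f + 1 =>
    if sm < finalSum then pvALoop f finalSum (i + 2) (sm + i) (res ++ [i])
    else (sm, res)

def maximumEvenSplit (finalSum : Int) : List Int :=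
  if PySem.Int.mod finalSum 2 == 1 then []
  else
    let p := pvALoop (finalSum.toNat + 1) finalSum 2 0 []
    if p.1 == finalSum then p.2
    else
      match PySem.List.pop? p.2 with             -- x = res.pop()
      | none => []                               -- IndexError (excluded by Pre_)
      | some (x, r) =>
        match PySem.List.pyGet? r (-1) with      -- res[-1] += finalSum-(sm-x)
        | none => []                             -- IndexError (excluded by Pre_)
        | some last => PySem.List.pySetD r (-1) (last + (finalSum - (p.1 - x)))

-- ===== PORT B =====
-- 'while lo < hi: mid = (lo+hi+1)//2; if mid*(mid+1) <= finalSum: lo = mid else: hi = mid-1';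
-- the fuel only makes the loop total (the gap hi-lo shrinks each round, so it never runs out)
def pvBSearch (fuel : Nat) (finalSum lo hi : Int) : Int :=
  match fuel with
  | 0 => lo
  | f + 1 =>
    if lo < hi then
      let mid := PySem.Int.floordiv (lo + hi + 1) 2
      if mid * (mid + 1) ≤ finalSum then pvBSearch f finalSum mid hi
      else pvBSearch f finalSum lo (mid - 1)
    else lo

def maximumEvenSplit_alt (finalSum : Int) : List Int :=
  if PySem.Int.mod finalSum 2 == 1 || finalSum ≤ 0 then []
  else
    let k := pvBSearch (finalSum.toNat + 1) finalSum 0 finalSum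
    let res := (PySem.List.pyRange 1 (k + 1) 1).map (fun j => 2 * j)
    let rem := finalSum - k * (k + 1)
    if rem ≠ 0 then
      match PySem.List.pyGet? res (-1) with      -- res[-1] += rem
      | none => []                               -- IndexError (unreachable here: k ≥ 1)
      | some last => PySem.List.pySetD res (-1) (last + rem)
    else res

-- ===== PRECONDITION & SPEC =====
-- Pre_ excludes exactly the negative even inputs, on which A raises IndexError
-- (res.pop() on the empty list left by the never-entered loop); B returns [] there.
def Pre_maximumEvenSplit (finalSum : Int) : Prop :=
  0 ≤ finalSum ∨ PySem.Int.mod finalSum 2 = 1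
instance (finalSum : Int) : Decidable (Pre_maximumEvenSplit finalSum) := by
  unfold Pre_maximumEvenSplit; infer_instance
def pvWitness_maximumEvenSplit : Int := 12

def Spec_maximumEvenSplit (finalSum : Int) (out : List Int) : Prop := out = maximumEvenSplit_alt finalSum
instance (finalSum : Int) (out : List Int) : Decidable (Spec_maximumEvenSplit finalSum out) := by unfold Spec_maximumEvenSplit; infer_instance

-- ===== CLAIM (what is proved, stated in full; the proofs are below) =====
def Claim_equal_maximumEvenSplit : Prop := ∀ (finalSum : Int), Dom_maximumEvenSplit finalSum → Pre_maximumEvenSplit finalSum → Spec_maximumEvenSplit finalSum (maximumEvenSplit finalSum)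

-- ===== LEMMAS AND PROOFS =====

-- the list of the first n positive even integers, which both programs build
def pvEvens (n : Nat) : List Int := (List.range n).map (fun j : Nat => 2 * ((j : Int) + 1))

theorem pvEvens_zero : pvEvens 0 = [] := rfl

theorem pvEvens_succ (n : Nat) : pvEvens (n + 1) = pvEvens n ++ [2 * ((n : Int) + 1)] := by
  simp [pvEvens, List.range_succ]

-- A's loop, started after m iterations, runs on to the first n with F ≤ n(n+1)
theorem pvALoop_spec (F : Int) (n : Nat) :
    ∀ (d fuel m : Nat), n - m = d → m ≤ n → n - m ≤ fuel →
    (∀ j : Nat, m ≤ j → j < n → (j : Int) * (j + 1) < F) →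
    F ≤ (n : Int) * (n + 1) →
    pvALoop fuel F (2 * m + 2) ((m : Int) * (m + 1)) (pvEvens m)
      = ((n : Int) * (n + 1), pvEvens n) := by
  intro d
  induction d with
  | zero =>
    intro fuel m hd hmn _ _ hF
    have : m = n := by omega
    subst this
    cases fuel with
    | zero => rfl
    | succ f => rw [pvALoop, if_neg (by omega)]
  | succ d ih =>
    intro fuel m hd hmn hfuel hj hF
    have hmlt : m < n := by omega
    obtain ⟨f, rfl⟩ : ∃ f, fuel = f + 1 := ⟨fuel - 1, by omega⟩
    rw [pvALoop, if_pos (hj m le_rfl hmlt)]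
    have := ih f (m + 1) (by omega) (by omega) (by omega)
      (fun j hj1 hj2 => hj j (by omega) hj2) hF
    have heq : pvEvens m ++ [2 * (m:Int) + 2] = pvEvens (m+1) := by
      rw [pvEvens_succ]; ring_nf
    rw [heq]
    convert this using 2
    all_goals (push_cast; ring)

theorem pvALoop_run (F : Int) (n fuel : Nat) (hfuel : n ≤ fuel)
    (hj : ∀ j : Nat, j < n → (j : Int) * (j + 1) < F) (hF : F ≤ (n : Int) * (n + 1)) :
    pvALoop fuel F 2 0 [] = ((n : Int) * (n + 1), pvEvens n) := by
  have h := pvALoop_spec F n (n - 0) fuel 0 rfl (Nat.zero_le n) (by omega)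
    (fun j _ hj2 => hj j hj2) hF
  rw [pvEvens_zero] at h
  norm_num at h
  exact h

-- B's binary search returns the largest k with k(k+1) ≤ F
theorem pvBSearch_spec (F : Int) : ∀ (fuel : Nat) (lo hi : Int),
    (hi - lo).toNat ≤ fuel → lo ≤ hi →
    lo * (lo + 1) ≤ F → F < (hi + 1) * (hi + 2) →
    lo ≤ pvBSearch fuel F lo hi ∧
    (pvBSearch fuel F lo hi) * (pvBSearch fuel F lo hi + 1) ≤ F ∧
    F < (pvBSearch fuel F lo hi + 1) * (pvBSearch fuel F lo hi + 2) := by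
  intro fuel
  induction fuel with
  | zero =>
    intro lo hi hf hle hlo hhi
    have : lo = hi := by omega
    subst this
    exact ⟨le_refl _, hlo, hhi⟩
  | succ f ih =>
    intro lo hi hf hle hlo hhi
    by_cases h : lo < hi
    · rw [pvBSearch, if_pos h]
      have hmid : lo < PySem.Int.floordiv (lo + hi + 1) 2 ∧
          PySem.Int.floordiv (lo + hi + 1) 2 ≤ hi := by
        rw [PySem.Int.floordiv_eq_ediv_of_pos (by omega : (0:Int) < 2)]
        omega
      by_cases hc : PySem.Int.floordiv (lo + hi + 1) 2 *
          (PySem.Int.floordiv (lo + hi + 1) 2 + 1) ≤ F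
      · rw [if_pos hc]
        have := ih _ hi (by omega) (by omega) hc hhi
        omega
      · rw [if_neg hc]
        have := ih lo (PySem.Int.floordiv (lo + hi + 1) 2 - 1) (by omega) (by omega)
          hlo (by nlinarith [not_le.mp hc])
        omega
    · rw [pvBSearch, if_neg h]
      have : lo = hi := by omega
      subst this
      exact ⟨le_refl _, hlo, hhi⟩

-- 'res[-1] = v' on a non-empty list
theorem pvSetLast (xs : List Int) (a v : Int) :
    PySem.List.pySetD (xs ++ [a]) (-1) v = xs ++ [v] := by
  simp [PySem.List.pySetD, PySem.List.pySet?, PySem.List.pyIdx?]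

-- B's comprehension over range(1, k+1) builds the first k positive even integers
theorem pvRange_evens (n : Nat) :
    (PySem.List.pyRange 1 ((n:Int) + 1) 1).map (fun j => 2 * j) = pvEvens n := by
  rw [PySem.List.pyRange_one]
  have h1 : ((n:Int) + 1 - 1).toNat = n := by omega
  rw [h1, List.map_map, pvEvens]
  apply List.map_congr_left
  intro a _
  show 2 * (1 + (a : Int)) = 2 * ((a : Int) + 1)
  ring

theorem pvMain : ∀ (F : Int), (0 ≤ F ∨ PySem.Int.mod F 2 = 1) →
    maximumEvenSplit F = maximumEvenSplit_alt F := by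
  intro F hpre
  have h2 : PySem.Int.mod F 2 = F % 2 := PySem.Int.mod_eq_emod_of_pos (by omega)
  by_cases hodd : F % 2 = 1
  · simp [maximumEvenSplit, maximumEvenSplit_alt, hodd]
  · have heven : F % 2 = 0 := by omega
    have hF0 : 0 ≤ F := by
      rcases hpre with h | h
      · exact h
      · rw [h2] at h; omega
    by_cases hz : F = 0
    · subst hz; decide
    · have hF2 : 2 ≤ F := by omega
      obtain ⟨hk0, hk1, hk2⟩ := pvBSearch_spec F (F.toNat + 1) 0 F (by omega) (by omega)
        (by omega) (by nlinarith)
      set k := pvBSearch (F.toNat + 1) F 0 F with hkdef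
      obtain ⟨kn, hkn⟩ : ∃ kn : Nat, (kn : Int) = k := ⟨k.toNat, Int.toNat_of_nonneg hk0⟩
      have hkF : k ≤ F := by nlinarith
      have hkpos : 1 ≤ k := by
        by_contra hc
        rw [not_le] at hc
        have : k = 0 := by omega
        rw [this] at hk2
        norm_num at hk2
        omega
      have hBguard : ¬ (PySem.Int.mod F 2 == 1 || decide (F ≤ 0)) = true := by
        rw [h2, heven]
        simp
        omega
      by_cases hrem : F = k * (k + 1)
      · -- exact split: both return the first k positive even integers
        have hA := pvALoop_run F kn (F.toNat + 1) (by omega)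
          (by
            intro j hjk
            have hj : (j : Int) + 1 ≤ k := by omega
            nlinarith [Int.natCast_nonneg j])
          (by rw [hkn]; omega)
        rw [hkn] at hA
        have hAeq : maximumEvenSplit F = pvEvens kn := by
          simp [maximumEvenSplit, heven, hA, hrem.symm]
        have hBeq : maximumEvenSplit_alt F = pvEvens kn := by
          simp only [maximumEvenSplit_alt]
          rw [if_neg hBguard]
          simp only [← hkdef, ← hrem]
          simp [pvRange_evens, ← hkn]
        rw [hAeq, hBeq]
      · -- overshoot: the last of the k even integers absorbs the remainder
        have hltF : k * (k + 1) < F := lt_of_le_of_ne hk1 (fun hc => hrem hc.symm)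
        obtain ⟨m, hm⟩ : ∃ m : Nat, kn = m + 1 := ⟨kn - 1, by omega⟩
        have hA := pvALoop_run F (kn + 1) (F.toNat + 1) (by omega)
          (by
            intro j hjk
            have hj : (j : Int) ≤ k := by omega
            nlinarith [Int.natCast_nonneg j])
          (by push_cast; rw [hkn]; nlinarith)
        have hne : ((kn:Int) + 1) * ((kn:Int) + 1 + 1) ≠ F := by
          intro hc
          rw [hkn] at hc
          rw [← hc] at hk2
          nlinarith
        have hAeq : maximumEvenSplit F = pvEvens m ++ [2 * ((m:Int) + 1) + (F - k * (k + 1))] := by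
          simp only [maximumEvenSplit, h2, heven]
          norm_num
          rw [hA]
          push_cast
          rw [if_neg hne]
          rw [pvEvens_succ, PySem.List.pop?_last]
          simp only []
          rw [hm, pvEvens_succ, PySem.List.pyGet?_neg_one_append_singleton]
          simp only []
          rw [pvSetLast, ← hkn, hm]
          push_cast
          congr 2
          ring
        have hBeq : maximumEvenSplit_alt F = pvEvens m ++ [2 * ((m:Int) + 1) + (F - k * (k + 1))] := by
          simp only [maximumEvenSplit_alt]
          rw [if_neg hBguard]
          simp only [← hkdef]
          rw [if_pos (by omega), ← hkn, pvRange_evens, hm, pvEvens_succ,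
            PySem.List.pyGet?_neg_one_append_singleton]
          simp only []
          rw [pvSetLast]
        rw [hAeq, hBeq]

-- ===== VERDICT (by name: the statement is the Claim_ definition above) =====
theorem maximumEvenSplit_spec : Claim_equal_maximumEvenSplit := by
  intro F _ hpre
  exact pvMain F hpre
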